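-- pv_equiv track=rewrite | github.com/GLARINGFISH8/Modul7 | DZ2/generator_Task/Problems1_3.py | F
-- ===== SOURCE A (Python) =====
-- def F(N):
--     acc = 1
--
--     while True:
--         if acc > N:
--             break
--
--         if acc % 3 != 0:
--             yield acc
--
--         acc += 1
-- ===== SOURCE B (Python) =====
-- def F(N):
--     for base in range(0, N, 3):
--         if base + 1 <= N:
--             yield base + 1
--         if base + 2 <= N:
--             yield base + 2
-- ===== Notes on version B (the rewrite author's own statement) =====
-- stated objective: alternative
-- what changed: B iterates over blocks of three using a stepped range and yields the two non-multiples of each block structurally, so no modulo test is ever computed, while A tests every integer up to N with a modulo.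
import Mathlib
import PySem

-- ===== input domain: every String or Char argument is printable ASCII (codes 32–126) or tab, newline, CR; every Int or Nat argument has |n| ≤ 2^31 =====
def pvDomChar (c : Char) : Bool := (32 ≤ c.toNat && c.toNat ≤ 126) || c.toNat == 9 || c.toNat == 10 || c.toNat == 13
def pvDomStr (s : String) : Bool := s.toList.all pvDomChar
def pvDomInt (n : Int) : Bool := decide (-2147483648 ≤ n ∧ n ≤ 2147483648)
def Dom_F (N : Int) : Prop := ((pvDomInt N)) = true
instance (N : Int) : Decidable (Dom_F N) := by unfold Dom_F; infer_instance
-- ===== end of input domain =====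

-- B iterates over blocks of three and yields base+1/base+2 structurally, skipping the multiple of 3 without a modulo test.

-- ===== PORT A =====
-- the while-loop of A: acc counts up from 1, yielding acc when acc % 3 ≠ 0
def FLoop (N acc : Int) : List Int :=
  if acc > N then []
  else (if acc % 3 ≠ 0 then [acc] else []) ++ FLoop N (acc + 1)
termination_by (N + 1 - acc).toNat
decreasing_by omega

def F (N : Int) : List Int := FLoop N 1

-- ===== PORT B =====
def F_alt (N : Int) : List Int :=
  (PySem.List.pyRange 0 N 3).foldl
    (fun out base =>
      (out ++ (if base + 1 ≤ N then [base + 1] else []))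
        ++ (if base + 2 ≤ N then [base + 2] else []))
    []

-- ===== PRECONDITION & SPEC =====
def Spec_F (N : Int) (out : List Int) : Prop := out = F_alt N
instance (N : Int) (out : List Int) : Decidable (Spec_F N out) := by unfold Spec_F; infer_instance

-- ===== CLAIM (what is proved, stated in full; the proofs are below) =====
def Claim_equal_F : Prop := ∀ (N : Int), Dom_F N → Spec_F N (F N)

-- ===== LEMMAS AND PROOFS =====

-- the per-block output of B
def blk (N base : Int) : List Int :=
  (if base + 1 ≤ N then [base + 1] else []) ++ (if base + 2 ≤ N then [base + 2] else [])

-- cons form of range(a, b, 3)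
lemma range3_cons (a b : Int) (h : a < b) :
    PySem.List.pyRange a b 3 = a :: PySem.List.pyRange (a + 3) b 3 := by
  rw [PySem.List.pyRange_of_pos a b (by norm_num),
      PySem.List.pyRange_of_pos (a + 3) b (by norm_num)]
  have h1 : ((b - a + 3 - 1) / 3).toNat =
      (if a + 3 < b then ((b - (a + 3) + 3 - 1) / 3).toNat else 0) + 1 := by
    split <;> omega
  rw [if_pos h, h1, List.range_succ_eq_map]
  simp [List.map_map, Function.comp_def]
  intro k _
  ring

lemma FLoop_eq_flatMap (N : Int) : ∀ (b : Int), b % 3 = 0 →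
    FLoop N (b + 1) = (PySem.List.pyRange b N 3).flatMap (blk N) := by
  intro b hb
  by_cases hbN : b < N
  · rw [range3_cons b N hbN]
    have h1 : ¬ (b + 1 > N) := by omega
    have hm1 : (b + 1) % 3 ≠ 0 := by omega
    rw [FLoop, if_neg h1, if_pos hm1]
    by_cases h2 : b + 2 ≤ N
    · have hm2 : (b + 2) % 3 ≠ 0 := by omega
      rw [FLoop, if_neg (by omega : ¬ (b + 1 + 1 > N)),
          if_pos (by omega : (b + 1 + 1) % 3 ≠ 0)]
      have hrest : FLoop N (b + 1 + 1 + 1) =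
          (PySem.List.pyRange (b + 3) N 3).flatMap (blk N) := by
        by_cases h3 : b + 3 ≤ N
        · rw [FLoop, if_neg (by omega : ¬ (b + 1 + 1 + 1 > N)),
              if_neg (by omega : ¬ (b + 1 + 1 + 1) % 3 ≠ 0)]
          have := FLoop_eq_flatMap N (b + 3) (by omega)
          simp only [List.nil_append]
          have he : b + 1 + 1 + 1 + 1 = b + 3 + 1 := by ring
          rw [he, this]
        · rw [FLoop, if_pos (by omega : b + 1 + 1 + 1 > N),
              PySem.List.pyRange_of_pos (b + 3) N (by norm_num),
              if_neg (by omega : ¬ b + 3 < N)]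
          simp
      rw [hrest]
      simp [blk, hbN, h2, show (b:Int) + 1 + 1 = b + 2 from by ring]
    · -- N = b + 1
      rw [FLoop, if_pos (by omega : b + 1 + 1 > N)]
      rw [PySem.List.pyRange_of_pos (b + 3) N (by norm_num),
          if_neg (by omega : ¬ b + 3 < N)]
      simp [blk, hbN, h2]
  · rw [FLoop, if_pos (by omega : b + 1 > N),
        PySem.List.pyRange_of_pos b N (by norm_num), if_neg hbN]
    simp
termination_by b => (N - b).toNat
decreasing_by omega

lemma F_alt_eq_flatMap (N : Int) :
    F_alt N = (PySem.List.pyRange 0 N 3).flatMap (blk N) := by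
  unfold F_alt
  have : (fun (out : List Int) base =>
      (out ++ (if base + 1 ≤ N then [base + 1] else []))
        ++ (if base + 2 ≤ N then [base + 2] else []))
      = fun out base => out ++ blk N base := by
    funext out base; simp [blk]
  rw [this, PySem.List.foldl_append_eq_flatMap]
  simp

-- ===== VERDICT (by name: the statement is the Claim_ definition above) =====
theorem F_spec : Claim_equal_F := by
  intro N _
  unfold Spec_F F
  rw [F_alt_eq_flatMap]
  have := FLoop_eq_flatMap N 0 (by decide)
  simpa using this
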